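-- pv_equiv track=rewrite | github.com/roydavid957/iwo-project | iwo_fp.py | tweets_w_age
-- ===== SOURCE A (Python) =====
-- def tweets_w_age(f, agerange): #filters data by birthyear in agerange in username, returns filtered datalist
-- 	tweets_w_age_list = []
-- 	for line in f:
-- 		line = line.split("\t")
-- 		username = line[0]
-- 		if any(age in username[-4:] for age in agerange):
-- 			tweets_w_age_list.append(line)
-- 	return tweets_w_age_list
-- ===== SOURCE B (Python) =====
-- def tweets_w_age(f, agerange):
--     ages = set(agerange)
--     out = []
--     for line in f:
--         parts = line.split("\t")
--         suffix = parts[0][-4:]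
--         subs = {suffix[i:j] for j in range(len(suffix) + 1) for i in range(j + 1)}
--         if not ages.isdisjoint(subs):
--             out.append(parts)
--     return out
-- ===== Notes on version B (the rewrite author's own statement) =====
-- stated objective: alternative
-- what changed: Instead of scanning the whole agerange per line, B precomputes set(agerange) once and tests it for disjointness against the (at most 15) substrings of the 4-character username suffix, so per-line work is independent of len(agerange) (it trades a per-age substring scan for building a tiny substring set per line).
import Mathlib
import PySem

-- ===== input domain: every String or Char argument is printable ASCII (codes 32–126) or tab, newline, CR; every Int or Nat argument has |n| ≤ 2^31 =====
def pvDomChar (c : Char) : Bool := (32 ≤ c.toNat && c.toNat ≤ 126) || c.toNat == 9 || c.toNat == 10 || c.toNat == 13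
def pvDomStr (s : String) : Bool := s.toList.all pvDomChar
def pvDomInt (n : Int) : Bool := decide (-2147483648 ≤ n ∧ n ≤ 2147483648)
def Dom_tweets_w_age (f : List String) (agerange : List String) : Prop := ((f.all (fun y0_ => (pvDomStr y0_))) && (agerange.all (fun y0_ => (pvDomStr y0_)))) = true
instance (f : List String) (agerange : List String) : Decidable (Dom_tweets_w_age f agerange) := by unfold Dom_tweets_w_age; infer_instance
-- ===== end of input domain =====

-- B replaces the per-line scan over the whole agerange by a precomputed set of ages
-- intersected with the (≤ 15) substrings of the 4-char username suffix (objective: alternative; per-line work independent of len(agerange), at the price of building a tiny substring set per line).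

-- ===== PORT A =====
def tweets_w_age (f : List String) (agerange : List String) : List (List String) :=
  f.foldl (fun acc line =>
    -- line.split("\t"): sep is the literal "\t" ≠ "", so split? is always some
    let parts := (PySem.Str.split? line "\t").getD []
    -- line[0]: str.split always returns a nonempty list, so no IndexError
    let username := PySem.List.pyGetD parts 0 ""
    if agerange.any (fun age => PySem.Str.isIn age (PySem.Str.slice username (some (-4)) none))
    then acc ++ [parts] else acc) []

-- ===== PORT B =====
def tweets_w_age_alt (f : List String) (agerange : List String) : List (List String) :=
  let ages := PySem.Set.ofList agerange
  f.foldl (fun out line =>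
    let parts := (PySem.Str.split? line "\t").getD []          -- sep "\t" ≠ "": always some
    let suffix := PySem.Str.slice (PySem.List.pyGetD parts 0 "") (some (-4)) none
    -- {suffix[i:j] for j in range(len(suffix)+1) for i in range(j+1)}
    let subs := PySem.Set.ofList ((PySem.List.pyRange 0 (PySem.Str.len suffix + 1) 1).flatMap (fun j =>
      (PySem.List.pyRange 0 (j + 1) 1).map (fun i =>
        PySem.Str.slice suffix (some i) (some j))))
    if !(PySem.Set.isdisjoint ages subs) then out ++ [parts] else out) []

-- ===== PRECONDITION & SPEC =====
def Spec_tweets_w_age (f : List String) (agerange : List String) (out : List (List String)) : Prop := out = tweets_w_age_alt f agerange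
instance (f : List String) (agerange : List String) (out : List (List String)) : Decidable (Spec_tweets_w_age f agerange out) := by unfold Spec_tweets_w_age; infer_instance

-- ===== CLAIM (what is proved, stated in full; the proofs are below) =====
def Claim_equal_tweets_w_age : Prop := ∀ (f : List String) (agerange : List String), Dom_tweets_w_age f agerange → Spec_tweets_w_age f agerange (tweets_w_age f agerange)

-- ===== LEMMAS AND PROOFS =====

-- a list is an infix of L exactly when it is take (j-i) (drop i L) for some i ≤ j ≤ |L|
theorem pv_infix_iff_take_drop {α : Type} (t L : List α) :
    t <:+: L ↔ ∃ j, j ≤ L.length ∧ ∃ i, i ≤ j ∧ t = List.take (j - i) (List.drop i L) := by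
  constructor
  · rintro ⟨pre, suf, rfl⟩
    refine ⟨pre.length + t.length, by simp, pre.length, by omega, ?_⟩
    rw [List.append_assoc, List.drop_left, Nat.add_sub_cancel_left, List.take_left]
  · rintro ⟨j, hj, i, hij, rfl⟩
    exact ((List.take_prefix _ _).isInfix).trans ((List.drop_suffix i L).isInfix)

-- B's substring-set membership = Python's 'age in suffix'
theorem pv_mem_subs_iff (suffix age : String) :
    (age ∈ (PySem.List.pyRange 0 (PySem.Str.len suffix + 1) 1).flatMap (fun j =>
      (PySem.List.pyRange 0 (j + 1) 1).map (fun i =>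
        PySem.Str.slice suffix (some i) (some j))))
    ↔ PySem.Str.isIn age suffix = true := by
  rw [PySem.Str.isIn_iff_infix, pv_infix_iff_take_drop]
  simp only [List.mem_flatMap, List.mem_map]
  constructor
  · rintro ⟨j, hj, i, hi, rfl⟩
    rw [PySem.List.mem_pyRange_iff_of_pos (by omega)] at hj hi
    have hlen := PySem.Str.len_eq suffix
    refine ⟨j.toNat, by omega, i.toNat, by omega, ?_⟩
    rw [PySem.Str.toList_slice]
    show PySem.List.slice _ _ _ = _
    rw [show (some j) = some ((j.toNat : Nat) : Int) by simp; omega,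
        show (some i) = some ((i.toNat : Nat) : Int) by simp; omega,
        PySem.List.slice_natCast]
  · rintro ⟨j, hj, i, hij, h⟩
    have hlen := PySem.Str.len_eq suffix
    refine ⟨(j : Int), ?_, (i : Int), ?_, ?_⟩
    · rw [PySem.List.mem_pyRange_iff_of_pos (by omega)]
      refine ⟨by omega, by omega, one_dvd _⟩
    · rw [PySem.List.mem_pyRange_iff_of_pos (by omega)]
      refine ⟨by omega, by omega, one_dvd _⟩
    · apply String.toList_inj.mp
      rw [PySem.Str.toList_slice]
      show PySem.List.slice _ _ _ = _
      rw [PySem.List.slice_natCast]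
      exact h.symm

-- the two per-line tests agree
theorem pv_cond_eq (agerange : List String) (suffix : String) :
    (agerange.any fun age => PySem.Str.isIn age suffix)
    = !(PySem.Set.isdisjoint (PySem.Set.ofList agerange)
        (PySem.Set.ofList ((PySem.List.pyRange 0 (PySem.Str.len suffix + 1) 1).flatMap (fun j =>
          (PySem.List.pyRange 0 (j + 1) 1).map (fun i =>
            PySem.Str.slice suffix (some i) (some j)))))) := by
  rw [Bool.eq_iff_iff, List.any_eq_true, Bool.not_eq_true', Bool.eq_false_iff, Ne,
      PySem.Set.isdisjoint_iff]
  push Not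
  constructor
  · rintro ⟨age, hmem, hin⟩
    exact ⟨age, (PySem.Set.mem_ofList _ _).mpr hmem,
      (PySem.Set.mem_ofList _ _).mpr ((pv_mem_subs_iff suffix age).mpr hin)⟩
  · rintro ⟨age, hmem, hsub⟩
    exact ⟨age, (PySem.Set.mem_ofList _ _).mp hmem,
      (pv_mem_subs_iff suffix age).mp ((PySem.Set.mem_ofList _ _).mp hsub)⟩

theorem pv_foldl_step_eq {α β : Type} (g h : β → α → β) (l : List α) (b : β)
    (hgh : ∀ b a, g b a = h b a) : l.foldl g b = l.foldl h b := by
  induction l generalizing b with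
  | nil => rfl
  | cons x xs ih => simp only [List.foldl_cons, hgh]; exact ih _

-- ===== VERDICT (by name: the statement is the Claim_ definition above) =====
theorem tweets_w_age_spec : Claim_equal_tweets_w_age := by
  intro f agerange _
  show tweets_w_age f agerange = tweets_w_age_alt f agerange
  unfold tweets_w_age tweets_w_age_alt
  apply pv_foldl_step_eq
  intro acc line
  simp only []
  rw [pv_cond_eq]
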